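-- pv_equiv track=rewrite | github.com/rtbo/gfx-d | tools/formatgen.py | parseNumAfterLetter
-- ===== SOURCE A (Python) =====
-- def parseNumAfterLetter(string, letter):
--     num = ""
--     while len(string):
--         if string[0] == letter:
--             string = string[1:]
--             while len(string) and string[0].isdigit():
--                 num += string[0]
--                 string = string[1:]
--             break
--         string = string[1:]
--     if len(num): return int(num)
--     else: return 0
-- ===== SOURCE B (Python) =====
-- def parseNumAfterLetter(string, letter):
--     # single pass: locate the letter by index, then advance over the digit run
--     if len(letter) != 1:
--         return 0
--     i = string.find(letter)
--     if i < 0: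
--         return 0
--     j = i + 1
--     while j < len(string) and string[j].isdigit():
--         j += 1
--     if j > i + 1:
--         return int(string[i + 1:j])
--     return 0
-- ===== Notes on version B (the rewrite author's own statement) =====
-- stated objective: faster
-- what changed: B replaces A's repeated string[1:] re-slicing loop with a single str.find to locate the letter plus an index walk over the digit run, converting the digits with one slice.
import Mathlib
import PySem

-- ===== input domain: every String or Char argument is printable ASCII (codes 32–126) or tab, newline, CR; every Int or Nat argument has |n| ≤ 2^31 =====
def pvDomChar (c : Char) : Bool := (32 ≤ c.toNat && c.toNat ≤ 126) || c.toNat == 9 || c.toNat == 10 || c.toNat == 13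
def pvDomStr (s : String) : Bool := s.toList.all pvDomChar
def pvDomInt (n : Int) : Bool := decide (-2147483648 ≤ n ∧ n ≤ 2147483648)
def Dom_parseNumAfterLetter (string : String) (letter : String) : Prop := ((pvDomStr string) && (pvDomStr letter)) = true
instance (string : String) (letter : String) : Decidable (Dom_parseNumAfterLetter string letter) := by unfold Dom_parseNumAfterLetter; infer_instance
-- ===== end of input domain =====

-- B locates the letter with str.find and walks the digit run by index (one pass,
-- no repeated slicing); objective: faster.

-- ===== PORT A =====
-- inner while: num += string[0]; string = string[1:]  while the head is a digit
def pvA_digits (num : List Char) (s : List Char) : List Char :=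
  match s with
  | [] => num
  | c :: rest => if PySem.Chars.isdigit c then pvA_digits (num ++ [c]) rest else num

-- outer while: scan for the first char equal to letter (string[0] == letter is a
-- 1-char-string/string comparison, i.e. [c] = letter.toList)
def pvA_loop (s : List Char) (letter : List Char) : List Char :=
  match s with
  | [] => []
  | c :: rest => if [c] = letter then pvA_digits [] rest else pvA_loop rest letter

def parseNumAfterLetter (string : String) (letter : String) : Int :=
  let num := pvA_loop string.toList letter.toList
  -- int(num): num is a nonempty run of ASCII digits here, so ofChars? is some; getD 0 is exact
  if num.length ≠ 0 then (PySem.Int.ofChars? num).getD 0 else 0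

-- ===== PORT B =====
-- while j < len(string) and string[j].isdigit(): j += 1
def pvB_scan (cs : List Char) (j : Nat) : Nat :=
  if h : j < cs.length then
    if PySem.Chars.isdigit cs[j] then pvB_scan cs (j + 1) else j
  else j
termination_by cs.length - j

def parseNumAfterLetter_alt (string : String) (letter : String) : Int :=
  if PySem.Str.len letter ≠ 1 then 0
  else
    let cs := string.toList
    let i := PySem.Chars.find cs letter.toList
    if i < 0 then 0
    else
      let j := pvB_scan cs (i.toNat + 1)
      if (j : Int) > i + 1 then
        -- int(string[i+1:j]): a nonempty run of ASCII digits, getD 0 is exact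
        (PySem.Int.ofChars? (PySem.List.slice cs (some (i + 1)) (some (j : Int)))).getD 0
      else 0

-- ===== PRECONDITION & SPEC =====
def Spec_parseNumAfterLetter (string : String) (letter : String) (out : Int) : Prop := out = parseNumAfterLetter_alt string letter
instance (string : String) (letter : String) (out : Int) : Decidable (Spec_parseNumAfterLetter string letter out) := by unfold Spec_parseNumAfterLetter; infer_instance

-- ===== CLAIM (what is proved, stated in full; the proofs are below) =====
def Claim_equal_parseNumAfterLetter : Prop := ∀ (string : String) (letter : String), Dom_parseNumAfterLetter string letter → Spec_parseNumAfterLetter string letter (parseNumAfterLetter string letter)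

-- ===== LEMMAS AND PROOFS =====

theorem pvA_digits_eq (s num : List Char) :
    pvA_digits num s = num ++ s.takeWhile PySem.Chars.isdigit := by
  induction s generalizing num with
  | nil => simp [pvA_digits]
  | cons c rest ih =>
    by_cases h : PySem.Chars.isdigit c <;>
      simp [pvA_digits, h, ih]

theorem pvA_loop_len_ne_one (s ls : List Char) (h : ls.length ≠ 1) :
    pvA_loop s ls = [] := by
  induction s with
  | nil => rfl
  | cons c rest ih =>
    have hne : ¬ ([c] = ls) := by rintro rfl; simp at h
    simp [pvA_loop, hne, ih]

theorem pvA_loop_no_infix (s : List Char) (l : Char) (h : ¬ [l] <:+: s) :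
    pvA_loop s [l] = [] := by
  induction s with
  | nil => rfl
  | cons c rest ih =>
    have hc : ¬ ([c] = [l]) := by
      intro hcl
      exact h (hcl ▸ List.IsPrefix.isInfix ⟨rest, rfl⟩)
    rw [pvA_loop, if_neg hc]
    exact ih (fun hin => h (hin.trans (List.suffix_cons c rest).isInfix))

theorem pvA_loop_found (s : List Char) (l : Char) (n : Nat)
    (hn : s[n]? = some l) (hmin : ∀ k, k < n → s[k]? ≠ some l) :
    pvA_loop s [l] = (s.drop (n + 1)).takeWhile PySem.Chars.isdigit := by
  induction s generalizing n with
  | nil => simp at hn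
  | cons c rest ih =>
    cases n with
    | zero =>
      simp only [List.getElem?_cons_zero, Option.some.injEq] at hn
      subst hn
      simp [pvA_loop, pvA_digits_eq]
    | succ m =>
      have hc : ¬ ([c] = [l]) := by
        intro h
        exact hmin 0 (Nat.succ_pos m) (by simpa using congrArg List.head? h)
      rw [pvA_loop, if_neg hc, List.drop_succ_cons]
      exact ih m (by simpa using hn) (fun k hk => by
        have := hmin (k + 1) (by omega)
        simpa using this)

theorem pvB_scan_eq (cs : List Char) (j : Nat) :
    pvB_scan cs j = j + ((cs.drop j).takeWhile PySem.Chars.isdigit).length := by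
  by_cases h : j < cs.length
  · have hdrop : cs.drop j = cs[j] :: cs.drop (j + 1) := (List.getElem_cons_drop h).symm
    by_cases hd : PySem.Chars.isdigit cs[j]
    · have ihj := pvB_scan_eq cs (j + 1)
      rw [pvB_scan, dif_pos h, if_pos hd, ihj, hdrop, List.takeWhile_cons, if_pos hd,
        List.length_cons]
      omega
    · rw [pvB_scan, dif_pos h, if_neg hd, hdrop, List.takeWhile_cons, if_neg hd]
      simp
  · rw [pvB_scan, dif_neg h, List.drop_eq_nil_of_le (by omega)]
    simp
termination_by cs.length - j

theorem getElem?_eq_some_of_prefix_drop (cs : List Char) (l : Char) (n : Nat)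
    (h : [l] <+: cs.drop n) : cs[n]? = some l := by
  obtain ⟨u, hu⟩ := h
  rw [← List.head?_drop, ← hu]
  rfl

theorem prefix_drop_of_getElem? (cs : List Char) (l : Char) (n : Nat)
    (h : cs[n]? = some l) : [l] <+: cs.drop n := by
  rw [← List.head?_drop] at h
  cases hd : cs.drop n with
  | nil => rw [hd] at h; simp at h
  | cons a t =>
    rw [hd] at h
    simp at h
    exact ⟨t, by simp [h]⟩

-- ===== VERDICT (by name: the statement is the Claim_ definition above) =====
theorem parseNumAfterLetter_spec : Claim_equal_parseNumAfterLetter := by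
  intro string letter _
  unfold Spec_parseNumAfterLetter
  by_cases hlen : letter.toList.length = 1
  · obtain ⟨l, hl⟩ : ∃ l, letter.toList = [l] := by
      cases hls : letter.toList with
      | nil => simp [hls] at hlen
      | cons a t =>
        cases t with
        | nil => exact ⟨a, rfl⟩
        | cons b t' => simp [hls] at hlen
    have hguard : ¬ (PySem.Str.len letter ≠ 1) := by
      simp [PySem.Str.len_eq, hl]
    set cs := string.toList with hcs
    by_cases hneg : PySem.Chars.find cs letter.toList < 0
    · -- letter absent: both sides return 0
      have hnin : ¬ ([l] <:+: cs) := by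
        apply (PySem.Chars.find_eq_neg_one_iff cs [l]).mp
        have := PySem.Chars.neg_one_le_find (s := cs) (sub := [l])
        rw [hl] at hneg
        omega
      have hA : parseNumAfterLetter string letter = 0 := by
        unfold parseNumAfterLetter
        rw [hl, pvA_loop_no_infix cs l hnin]
        simp
      have hB : parseNumAfterLetter_alt string letter = 0 := by
        unfold parseNumAfterLetter_alt
        rw [if_neg hguard, if_pos hneg]
      rw [hA, hB]
    · -- letter found; first index n
      rw [hl] at hneg
      have h0 : 0 ≤ PySem.Chars.find cs [l] := by omega
      obtain ⟨hpre, hmin⟩ := PySem.Chars.find_spec (s := cs) (sub := [l]) h0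
      set n : Nat := (PySem.Chars.find cs [l]).toNat with hn
      have hi : PySem.Chars.find cs [l] = (n : Int) := (Int.toNat_of_nonneg h0).symm
      have hget : cs[n]? = some l := getElem?_eq_some_of_prefix_drop cs l n hpre
      have hmin' : ∀ k, k < n → cs[k]? ≠ some l := fun k hk hkl =>
        hmin k hk (prefix_drop_of_getElem? cs l k hkl)
      set t := (cs.drop (n + 1)).takeWhile PySem.Chars.isdigit with ht
      have hA : parseNumAfterLetter string letter =
          (if t.length ≠ 0 then (PySem.Int.ofChars? t).getD 0 else 0) := by
        unfold parseNumAfterLetter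
        rw [hl, pvA_loop_found cs l n hget hmin']
      have hB : parseNumAfterLetter_alt string letter =
          (if t.length ≠ 0 then (PySem.Int.ofChars? t).getD 0 else 0) := by
        unfold parseNumAfterLetter_alt
        rw [if_neg hguard, hl]
        rw [show string.toList = cs from rfl]
        rw [if_neg (by omega)]
        have hscan : pvB_scan cs (((PySem.Chars.find cs [l]).toNat) + 1) = (n + 1) + t.length := by
          rw [← hn, pvB_scan_eq, ← ht]
        rw [hscan]
        show (if (((n + 1) + t.length : Nat) : Int) > PySem.Chars.find cs [l] + 1 then
            (PySem.Int.ofChars? (PySem.List.slice cs (some (PySem.Chars.find cs [l] + 1))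
              (some (((n + 1) + t.length : Nat) : Int)))).getD 0
          else 0) = _
        have hslice : PySem.List.slice cs (some (PySem.Chars.find cs [l] + 1))
            (some (((n + 1) + t.length : Nat) : Int)) = t := by
          have h1 : PySem.Chars.find cs [l] + 1 = ((n + 1 : Nat) : Int) := by
            rw [hi]; push_cast; ring
          have h2 : (((n + 1) + t.length : Nat) : Int)
              = ((n + 1 : Nat) : Int) + (t.length : Int) := by push_cast; ring
          rw [h1, h2, PySem.List.slice_natCast_add, ht]
          exact (List.prefix_iff_eq_take.mp (List.takeWhile_prefix _)).symm
        rw [hslice]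
        by_cases hts : t.length = 0
        · rw [if_neg (by rw [hi]; push_cast; omega), if_neg (by omega)]
        · rw [if_pos (by rw [hi]; push_cast; omega), if_pos (by omega)]
      rw [hA, hB]
  · have hA : parseNumAfterLetter string letter = 0 := by
      unfold parseNumAfterLetter
      rw [pvA_loop_len_ne_one _ _ hlen]
      simp
    have hB : parseNumAfterLetter_alt string letter = 0 := by
      unfold parseNumAfterLetter_alt
      rw [if_pos (by simp only [PySem.Str.len_eq]; exact fun h => hlen (by exact_mod_cast h))]
    rw [hA, hB]
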